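-- pv_equiv track=rewrite | github.com/AlexDuchnowski/PerfectGraphs | graph_generation.py | complete_multipartite
-- ===== SOURCE A (Python) =====
-- from typing import List, Tuple
--
-- def complete_multipartite(sizes: List[int]) -> Tuple[List[int], List[Tuple[int]]]:
--     if len(sizes) < 2:
--         raise ValueError(f"A complete multipartite graph must have at least two parts.")
--     if len(sizes) == 2:
--         X = list(range(1, sizes[0] + 1))
--         Y = list(range(sizes[0] + 1, sum(sizes) + 1))
--         vertices = X + Y
--         edges = [(x, y) for x in X for y in Y]
--         return vertices, edges
--     else:
--         rest_v, rest_e = complete_multipartite(sizes[:-1])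
--         Z = list(range(sum(sizes[:-1]) + 1, sum(sizes) + 1))
--         vertices = rest_v + Z
--         edges = rest_e + [(x, z) for x in rest_v for z in Z]
--         return vertices, edges
-- ===== SOURCE B (Python) =====
-- from typing import List, Tuple
--
-- def complete_multipartite(sizes: List[int]) -> Tuple[List[int], List[Tuple[int]]]:
--     if len(sizes) < 2:
--         raise ValueError(f"A complete multipartite graph must have at least two parts.")
--     offset = sizes[0]
--     vertices = list(range(1, offset + 1))
--     edges = []
--     for s in sizes[1:]:
--         part = list(range(offset + 1, offset + s + 1))
--         edges.extend((x, z) for x in vertices for z in part)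
--         vertices += part
--         offset += s
--     return vertices, edges
-- ===== Notes on version B (the rewrite author's own statement) =====
-- stated objective: faster
-- what changed: Replaces A's recursion on sizes[:-1] (which copies the slice, re-sums prefixes and rebuilds the whole edge list rest_e at every level) with a single left-to-right loop keeping a running offset and extending the edge list in place.
import Mathlib
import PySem

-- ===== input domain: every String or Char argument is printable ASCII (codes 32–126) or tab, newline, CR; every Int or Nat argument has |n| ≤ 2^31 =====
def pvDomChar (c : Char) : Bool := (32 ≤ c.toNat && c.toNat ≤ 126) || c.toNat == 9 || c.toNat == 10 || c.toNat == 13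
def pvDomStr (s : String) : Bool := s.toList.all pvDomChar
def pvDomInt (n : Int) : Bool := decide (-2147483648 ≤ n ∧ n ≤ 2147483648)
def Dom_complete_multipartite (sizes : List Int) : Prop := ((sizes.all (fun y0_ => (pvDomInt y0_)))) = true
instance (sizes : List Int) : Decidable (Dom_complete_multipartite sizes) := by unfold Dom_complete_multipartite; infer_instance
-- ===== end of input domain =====

-- B replaces A's recursion on sizes[:-1] (which rebuilds the edge list at every level)
-- by one left-to-right pass with a running offset, extending the edge list in place;
-- objective: faster.
-- A mutates nothing; equivalence is about the return value.

-- ===== PORT A =====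
-- literal transliteration of A; sizes[:-1] is List.dropLast (exact for Python's [:-1]),
-- range(a, b) is PySem.List.pyRange a b 1, sizes[0] is pyGetD (index 0 always in range here).
def complete_multipartite (sizes : List Int) : List Int × List (List Int) :=
  if sizes.length < 2 then ([], [])  -- Python raises ValueError here; excluded by Pre_
  else if sizes.length = 2 then
    let X := PySem.List.pyRange 1 (PySem.List.pyGetD sizes 0 0 + 1) 1
    let Y := PySem.List.pyRange (PySem.List.pyGetD sizes 0 0 + 1) (sizes.sum + 1) 1
    (X ++ Y, X.flatMap (fun x => Y.map (fun y => [x, y])))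
  else
    let rest := complete_multipartite sizes.dropLast
    let Z := PySem.List.pyRange (sizes.dropLast.sum + 1) (sizes.sum + 1) 1
    (rest.1 ++ Z, rest.2 ++ rest.1.flatMap (fun x => Z.map (fun z => [x, z])))
termination_by sizes.length
decreasing_by
  rename_i h1 _h2
  simp [List.length_dropLast]
  omega

-- ===== PORT B =====
-- one loop iteration of Source B: state = (vertices, edges, offset)
def cmAltStep (st : List Int × List (List Int) × Int) (s : Int) :
    List Int × List (List Int) × Int :=
  let part := PySem.List.pyRange (st.2.2 + 1) (st.2.2 + s + 1) 1
  (st.1 ++ part,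
   st.2.1 ++ st.1.flatMap (fun x => part.map (fun z => [x, z])),
   st.2.2 + s)

def complete_multipartite_alt (sizes : List Int) : List Int × List (List Int) :=
  if sizes.length < 2 then ([], [])  -- Python raises ValueError here; excluded by Pre_
  else
    let offset := PySem.List.pyGetD sizes 0 0
    let st := sizes.tail.foldl cmAltStep (PySem.List.pyRange 1 (offset + 1) 1, [], offset)
    (st.1, st.2.1)

-- ===== PRECONDITION & SPEC =====
-- A raises ValueError when len(sizes) < 2; exactly those inputs are excluded.
def Pre_complete_multipartite (sizes : List Int) : Prop := 2 ≤ sizes.length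
instance (sizes : List Int) : Decidable (Pre_complete_multipartite sizes) := by
  unfold Pre_complete_multipartite; infer_instance
def pvWitness_complete_multipartite : List Int := [1, 2]

def Spec_complete_multipartite (sizes : List Int) (out : List Int × List (List Int)) : Prop := out = complete_multipartite_alt sizes
instance (sizes : List Int) (out : List Int × List (List Int)) : Decidable (Spec_complete_multipartite sizes out) := by unfold Spec_complete_multipartite; infer_instance

-- ===== CLAIM (what is proved, stated in full; the proofs are below) =====
def Claim_equal_complete_multipartite : Prop := ∀ (sizes : List Int), Dom_complete_multipartite sizes → Pre_complete_multipartite sizes → Spec_complete_multipartite sizes (complete_multipartite sizes)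

-- ===== LEMMAS AND PROOFS =====

-- the offset component of B's state tracks the running sum
lemma cmAlt_offset (l : List Int) (st : List Int × List (List Int) × Int) :
    (l.foldl cmAltStep st).2.2 = st.2.2 + l.sum := by
  induction l generalizing st with
  | nil => simp
  | cons s l ih => simp [List.foldl_cons, ih, cmAltStep]; ring

-- A on s0 :: rs ++ [z] equals B's fold, by induction on rs from the right
lemma cm_main (s0 : Int) (rs : List Int) (z : Int) :
    complete_multipartite (s0 :: (rs ++ [z])) =
      (((rs ++ [z]).foldl cmAltStep (PySem.List.pyRange 1 (s0 + 1) 1, [], s0)).1,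
       ((rs ++ [z]).foldl cmAltStep (PySem.List.pyRange 1 (s0 + 1) 1, [], s0)).2.1) := by
  induction rs using List.reverseRecOn generalizing z with
  | nil =>
      rw [complete_multipartite]
      simp [cmAltStep, PySem.List.pyGetD, PySem.List.pyGet?, PySem.List.pyIdx?]
  | append_singleton rs' z' ih =>
      rw [complete_multipartite]
      have hlen : ¬ (s0 :: (rs' ++ [z'] ++ [z])).length < 2 := by simp
      have hlen2 : ¬ (s0 :: (rs' ++ [z'] ++ [z])).length = 2 := by simp
      have hdrop : (s0 :: (rs' ++ [z'] ++ [z])).dropLast = s0 :: (rs' ++ [z']) := by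
        rw [show s0 :: (rs' ++ [z'] ++ [z]) = (s0 :: (rs' ++ [z'])) ++ [z] by simp]
        exact List.dropLast_concat
      simp only [hlen, hlen2, if_false, hdrop, ih]
      have hfold : (rs' ++ [z'] ++ [z]).foldl cmAltStep
          (PySem.List.pyRange 1 (s0 + 1) 1, [], s0)
          = cmAltStep ((rs' ++ [z']).foldl cmAltStep
              (PySem.List.pyRange 1 (s0 + 1) 1, [], s0)) z := by
        rw [List.foldl_append]; rfl
      have hoff := cmAlt_offset (rs' ++ [z']) (PySem.List.pyRange 1 (s0 + 1) 1, [], s0)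
      simp only [hfold, cmAltStep, hoff]
      have h1 : (s0 :: (rs' ++ [z'])).sum = s0 + (rs' ++ [z']).sum := by simp
      have h2 : (s0 :: (rs' ++ [z'] ++ [z])).sum = s0 + (rs' ++ [z']).sum + z := by
        simp; ring
      rw [h1, h2]

-- ===== VERDICT (by name: the statement is the Claim_ definition above) =====
theorem complete_multipartite_spec : Claim_equal_complete_multipartite := by
  intro sizes _ hpre
  unfold Spec_complete_multipartite complete_multipartite_alt
  unfold Pre_complete_multipartite at hpre
  match sizes, hpre with
  | s0 :: rest, hpre =>
    have hne : rest ≠ [] := by intro h; subst h; simp at hpre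
    rcases (List.eq_nil_or_concat rest) with h | ⟨rs, z, rfl⟩
    · exact absurd h hne
    rw [List.concat_eq_append] at *
    rw [cm_main]
    have hnn : (0:Int) ≤ (rs.length : Int) + 1 := by positivity
    simp [PySem.List.pyGetD, PySem.List.pyGet?, PySem.List.pyIdx?, hnn]
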